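-- pv_equiv track=rewrite | github.com/carlosjavier44/PCAP | PCAP/Programas/ordenarnumeros.py | ordena_positivos
-- ===== SOURCE A (Python) =====
-- def ordena_positivos(lista):
--     if not lista:
--         return []
--
--     positivos_ordenados = sorted([num for num in lista if num > 0])
--
--     resultado = []
--     indice_positivos = 0
--     for num in lista:
--         if num > 0:
--             resultado.append(positivos_ordenados[indice_positivos])
--             indice_positivos += 1
--         else:
--             resultado.append(num)
--
--     return resultado
-- ===== SOURCE B (Python) =====
-- def _merge(a, b):
--     # leftist min-heap merge; a heap is None or (value, rank, left, right)
--     if a is None: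
--         return b
--     if b is None:
--         return a
--     if b[0] < a[0]:
--         a, b = b, a
--     l = a[2]
--     r = _merge(a[3], b)
--     rl = l[1] if l else 0
--     rr = r[1] if r else 0
--     if rl >= rr:
--         return (a[0], rr + 1, l, r)
--     return (a[0], rl + 1, r, l)
--
--
-- def ordena_positivos(lista):
--     if not lista:
--         return []
--     heap = None
--     for n in lista:
--         if n > 0:
--             heap = _merge((n, 1, None, None), heap)
--     resultado = []
--     for x in lista:
--         if x > 0:
--             resultado.append(heap[0])
--             heap = _merge(heap[2], heap[3])
--         else:
--             resultado.append(x)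
--     return resultado
-- ===== Notes on version B (the rewrite author's own statement) =====
-- stated objective: alternative
-- what changed: B never calls sorted: it builds a hand-written leftist min-heap of the positive values and, in a second pass, pops the heap minimum at each positive slot (heapsort interleaved with the rebuild), whereas A pre-sorts the positives with sorted() and plays them back through a cursor.
import Mathlib
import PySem

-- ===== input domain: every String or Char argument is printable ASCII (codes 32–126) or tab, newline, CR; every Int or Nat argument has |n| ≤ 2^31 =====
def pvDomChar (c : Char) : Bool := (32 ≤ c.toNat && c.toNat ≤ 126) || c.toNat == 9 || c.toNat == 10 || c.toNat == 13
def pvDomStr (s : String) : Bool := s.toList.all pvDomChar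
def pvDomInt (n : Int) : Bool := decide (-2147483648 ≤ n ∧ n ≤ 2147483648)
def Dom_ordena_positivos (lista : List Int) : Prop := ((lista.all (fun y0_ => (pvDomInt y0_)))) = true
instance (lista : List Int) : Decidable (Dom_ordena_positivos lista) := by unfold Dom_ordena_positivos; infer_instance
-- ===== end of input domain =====

-- B replaces A's sorted()-then-playback by a hand-written leftist-heap heapsort of the
-- positives, popped at each positive slot (objective: alternative, same asymptotic cost).

-- ===== PORT A =====
-- Literal port of A: early [] return, sort the positive elements, then one pass
-- that appends positivos_ordenados[indice] (advancing the cursor) for positives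
-- and the element itself otherwise.
def ordena_positivos (lista : List Int) : List Int :=
  if lista = [] then []
  else
    let positivos_ordenados := PySem.List.sorted (lista.filter (fun num => 0 < num)) (fun x => x) false
    let st := lista.foldl (fun (st : List Int × Int) num =>
        if 0 < num then (st.1 ++ [PySem.List.pyGetD positivos_ordenados st.2 0], st.2 + 1)
        else (st.1 ++ [num], st.2)) ([], (0 : Int))
    st.1

-- ===== PORT B =====
-- B's heap: Python's None is .leaf, the tuple (value, rank, left, right) is .node.
inductive PvHeap : Type where
  | leaf : PvHeap
  | node : Int → Nat → PvHeap → PvHeap → PvHeap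
deriving DecidableEq, Repr

def pvRank : PvHeap → Nat
  | .leaf => 0
  | .node _ k _ _ => k

def pvSize : PvHeap → Nat
  | .leaf => 0
  | .node _ _ l r => pvSize l + pvSize r + 1

-- Literal port of Source B's _merge (leftist min-heap merge, including the swap when b[0] < a[0]).
def pvMergeH : PvHeap → PvHeap → PvHeap
  | .leaf, b => b
  | .node va ka la ra, .leaf => .node va ka la ra
  | .node va ka la ra, .node vb kb lb rb =>
    if vb < va then
      let r := pvMergeH rb (.node va ka la ra)
      if pvRank r ≤ pvRank lb then .node vb (pvRank r + 1) lb r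
      else .node vb (pvRank lb + 1) r lb
    else
      let r := pvMergeH ra (.node vb kb lb rb)
      if pvRank r ≤ pvRank la then .node va (pvRank r + 1) la r
      else .node va (pvRank la + 1) r la
termination_by a b => pvSize a + pvSize b
decreasing_by all_goals (simp [pvSize]; try omega)

-- Literal port of B: first pass pushes each positive into the heap; second pass pops
-- the heap minimum at each positive slot (the .leaf arm there only guards totality:
-- Python's heap[0] would raise, and the heap is never empty when it is consulted).
def ordena_positivos_alt (lista : List Int) : List Int :=
  if lista = [] then []
  else
    let heap := lista.foldl (fun h n =>
        if 0 < n then pvMergeH (.node n 1 .leaf .leaf) h else h) .leaf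
    (lista.foldl (fun (st : List Int × PvHeap) x =>
        if 0 < x then
          match st.2 with
          | .node v _ hl hr => (st.1 ++ [v], pvMergeH hl hr)
          | .leaf => (st.1 ++ [x], PvHeap.leaf)
        else (st.1 ++ [x], st.2)) ([], heap)).1

-- ===== PRECONDITION & SPEC =====
def Spec_ordena_positivos (lista : List Int) (out : List Int) : Prop := out = ordena_positivos_alt lista
instance (lista : List Int) (out : List Int) : Decidable (Spec_ordena_positivos lista out) := by unfold Spec_ordena_positivos; infer_instance

-- ===== CLAIM (what is proved, stated in full; the proofs are below) =====
def Claim_equal_ordena_positivos : Prop := ∀ (lista : List Int), Dom_ordena_positivos lista → Spec_ordena_positivos lista (ordena_positivos lista)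

-- ===== LEMMAS AND PROOFS =====

-- Reference for A's loop: interleave the queue q into the positive slots of l.
def pvMerge : List Int → List Int → List Int
  | [], _ => []
  | x :: xs, q =>
    if 0 < x then
      match q with
      | v :: vs => v :: pvMerge xs vs
      | [] => []
    else x :: pvMerge xs q

theorem pvLoopA (l q res : List Int) (i : Nat)
    (h : i + l.countP (fun x => 0 < x) ≤ q.length) :
    (l.foldl (fun (st : List Int × Int) num =>
        if 0 < num then (st.1 ++ [PySem.List.pyGetD q st.2 0], st.2 + 1)
        else (st.1 ++ [num], st.2)) (res, (i : Int))).1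
      = res ++ pvMerge l (q.drop i) := by
  induction l generalizing res i with
  | nil => simp [pvMerge]
  | cons x xs ih =>
    by_cases hx : 0 < x
    · have hcount : i + xs.countP (fun x => 0 < x) + 1 ≤ q.length := by
        simp [hx] at h; omega
      have hi : i < q.length := by omega
      have hdrop : q.drop i = q[i] :: q.drop (i + 1) := List.drop_eq_getElem_cons hi
      have hget : PySem.List.pyGetD q (i : Int) 0 = q[i] := by
        simp [PySem.List.pyGetD_natCast, List.getD_eq_getElem?_getD, List.getElem?_eq_getElem hi]
      have hcast : ((i : Int) + 1) = ((i + 1 : Nat) : Int) := by push_cast; ring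
      simp only [List.foldl_cons, if_pos hx, hget, hcast]
      rw [ih (res ++ [q[i]]) (i + 1) (by omega), hdrop]
      simp [pvMerge, hx]
    · simp only [List.foldl_cons, if_neg hx]
      rw [ih (res ++ [x]) i (by simp [hx] at h ⊢; omega)]
      simp [pvMerge, hx]

-- heap contents, as a list (root first)
def pvElems : PvHeap → List Int
  | .leaf => []
  | .node v _ l r => v :: (pvElems l ++ pvElems r)

theorem pvElems_merge (a b : PvHeap) :
    (↑(pvElems (pvMergeH a b)) : Multiset Int) = ↑(pvElems a) + ↑(pvElems b) := by
  fun_induction pvMergeH a b with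
  | case1 => simp [pvElems]
  | case2 => simp [pvElems]
  | case3 va ka la ra vb kb lb rb hlt r hrk ih | case4 va ka la ra vb kb lb rb hlt r hrk ih
  | case5 va ka la ra vb kb lb rb hlt r hrk ih | case6 va ka la ra vb kb lb rb hlt r hrk ih =>
    simp only [pvElems, ← Multiset.cons_coe, ← Multiset.coe_add, ← Multiset.singleton_add] at ih ⊢
    rw [ih]; abel

theorem pvMem_merge (a b : PvHeap) (y : Int) :
    y ∈ pvElems (pvMergeH a b) ↔ y ∈ pvElems a ∨ y ∈ pvElems b := by
  rw [← Multiset.mem_coe, pvElems_merge, Multiset.mem_add, Multiset.mem_coe, Multiset.mem_coe]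

theorem pvLength_merge (a b : PvHeap) :
    (pvElems (pvMergeH a b)).length = (pvElems a).length + (pvElems b).length := by
  have := congrArg Multiset.card (pvElems_merge a b)
  simpa using this

-- min-heap order
def pvOrd : PvHeap → Prop
  | .leaf => True
  | .node v _ l r => (∀ y, y ∈ pvElems l ∨ y ∈ pvElems r → v ≤ y) ∧ pvOrd l ∧ pvOrd r

theorem pvOrd_merge (a b : PvHeap) (ha : pvOrd a) (hb : pvOrd b) :
    pvOrd (pvMergeH a b) := by
  fun_induction pvMergeH a b with
  | case1 => exact hb
  | case2 => exact ha
  | case3 va ka la ra vb kb lb rb hlt r hrk ih | case4 va ka la ra vb kb lb rb hlt r hrk ih =>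
    obtain ⟨hav, hal, har⟩ := ha
    obtain ⟨hbv, hbl, hbr⟩ := hb
    have hr : pvOrd (pvMergeH rb (.node va ka la ra)) := ih hbr ⟨hav, hal, har⟩
    have hmem : ∀ y, y ∈ pvElems (pvMergeH rb (.node va ka la ra)) → vb ≤ y := by
      intro y hy
      rcases (pvMem_merge _ _ y).1 hy with h | h
      · exact hbv y (Or.inr h)
      · simp only [pvElems, List.mem_cons, List.mem_append] at h
        rcases h with h | h | h
        · exact le_of_lt (h ▸ hlt)
        · exact le_trans (le_of_lt hlt) (hav y (Or.inl h))
        · exact le_trans (le_of_lt hlt) (hav y (Or.inr h))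
    first
    | exact ⟨fun y hy => hy.elim (fun h => hbv y (Or.inl h)) (hmem y), hbl, hr⟩
    | exact ⟨fun y hy => hy.elim (hmem y) (fun h => hbv y (Or.inl h)), hr, hbl⟩
  | case5 va ka la ra vb kb lb rb hlt r hrk ih | case6 va ka la ra vb kb lb rb hlt r hrk ih =>
    obtain ⟨hav, hal, har⟩ := ha
    obtain ⟨hbv, hbl, hbr⟩ := hb
    have hle : va ≤ vb := not_lt.1 hlt
    have hr : pvOrd (pvMergeH ra (.node vb kb lb rb)) := ih har ⟨hbv, hbl, hbr⟩
    have hmem : ∀ y, y ∈ pvElems (pvMergeH ra (.node vb kb lb rb)) → va ≤ y := by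
      intro y hy
      rcases (pvMem_merge _ _ y).1 hy with h | h
      · exact hav y (Or.inr h)
      · simp only [pvElems, List.mem_cons, List.mem_append] at h
        rcases h with h | h | h
        · exact h ▸ hle
        · exact le_trans hle (hbv y (Or.inl h))
        · exact le_trans hle (hbv y (Or.inr h))
    first
    | exact ⟨fun y hy => hy.elim (fun h => hav y (Or.inl h)) (hmem y), hal, hr⟩
    | exact ⟨fun y hy => hy.elim (hmem y) (fun h => hav y (Or.inl h)), hr, hal⟩

-- phase 1: the built heap holds exactly the positive elements, and is heap-ordered
theorem pvBuild_elems (l : List Int) (h : PvHeap) :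
    (↑(pvElems (l.foldl (fun h n =>
        if 0 < n then pvMergeH (.node n 1 .leaf .leaf) h else h) h)) : Multiset Int)
      = ↑(pvElems h) + ↑(l.filter (fun n => 0 < n)) := by
  induction l generalizing h with
  | nil => simp
  | cons x xs ih =>
    by_cases hx : 0 < x
    · rw [List.foldl_cons, if_pos hx, ih, pvElems_merge]
      simp only [List.filter_cons, hx, decide_true, if_true, pvElems, List.append_nil,
        ← Multiset.cons_coe, ← Multiset.singleton_add, Multiset.coe_nil]
      abel
    · simp [List.foldl_cons, hx, ih]

theorem pvBuild_ord (l : List Int) (h : PvHeap) (hh : pvOrd h) :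
    pvOrd (l.foldl (fun h n =>
        if 0 < n then pvMergeH (.node n 1 .leaf .leaf) h else h) h) := by
  induction l generalizing h with
  | nil => exact hh
  | cons x xs ih =>
    by_cases hx : 0 < x
    · simp only [List.foldl_cons, if_pos hx]
      exact ih _ (pvOrd_merge _ _ ⟨by simp [pvElems], trivial, trivial⟩ hh)
    · simpa [List.foldl_cons, if_neg hx] using ih _ hh

-- sorted heap contents = root, then sorted contents of the merged children
theorem pvSorted_pop (v : Int) (k : Nat) (hl hr : PvHeap)
    (hord : pvOrd (.node v k hl hr)) :
    PySem.List.sorted (pvElems (.node v k hl hr)) (fun x => x) false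
      = v :: PySem.List.sorted (pvElems (pvMergeH hl hr)) (fun x => x) false := by
  obtain ⟨hv, _, _⟩ := hord
  apply PySem.List.sorted_id_eq_of_perm_of_pairwise
  · refine ((PySem.List.sorted_perm _ _ _).cons v).trans ?_
    have : (pvElems (pvMergeH hl hr)).Perm (pvElems hl ++ pvElems hr) := by
      rw [← Multiset.coe_eq_coe, pvElems_merge, Multiset.coe_add]
    exact (this.cons v).trans (by simp [pvElems])
  · rw [List.pairwise_cons]
    refine ⟨fun y hy => ?_, PySem.List.sorted_pairwise _ _⟩
    exact hv y ((pvMem_merge _ _ y).1 ((PySem.List.mem_sorted _ _ _ _).1 hy))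

-- phase 2: popping at each positive slot = playback of the sorted heap contents
theorem pvLoopB (l : List Int) (h : PvHeap) (res : List Int)
    (hord : pvOrd h) (hc : l.countP (fun x => 0 < x) ≤ (pvElems h).length) :
    (l.foldl (fun (st : List Int × PvHeap) x =>
        if 0 < x then
          match st.2 with
          | .node v _ hl hr => (st.1 ++ [v], pvMergeH hl hr)
          | .leaf => (st.1 ++ [x], PvHeap.leaf)
        else (st.1 ++ [x], st.2)) (res, h)).1
      = res ++ pvMerge l (PySem.List.sorted (pvElems h) (fun x => x) false) := by
  induction l generalizing h res with
  | nil => simp [pvMerge]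
  | cons x xs ih =>
    by_cases hx : 0 < x
    · match h with
      | .leaf => simp [pvElems, hx] at hc
      | .node v k hl hr =>
        obtain ⟨hv, hol, hor⟩ := hord
        have hlen : xs.countP (fun x => 0 < x) ≤ (pvElems (pvMergeH hl hr)).length := by
          rw [pvLength_merge]
          simp [hx, pvElems] at hc ⊢; omega
        simp only [List.foldl_cons, if_pos hx]
        rw [ih (pvMergeH hl hr) (res ++ [v]) (pvOrd_merge _ _ hol hor) hlen,
          pvSorted_pop v k hl hr ⟨hv, hol, hor⟩]
        simp [pvMerge, hx]
    · simp only [List.foldl_cons, if_neg hx]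
      rw [ih h (res ++ [x]) hord (by simp [hx] at hc ⊢; omega)]
      simp [pvMerge, hx]

-- ===== VERDICT (by name: the statement is the Claim_ definition above) =====
theorem ordena_positivos_spec : Claim_equal_ordena_positivos := by
  intro lista _
  unfold Spec_ordena_positivos ordena_positivos ordena_positivos_alt
  by_cases hnil : lista = []
  · simp [hnil]
  · simp only [if_neg hnil]
    set heap := lista.foldl (fun h n =>
        if 0 < n then pvMergeH (.node n 1 .leaf .leaf) h else h) .leaf with hheap
    have hperm : (pvElems heap).Perm (lista.filter (fun n => 0 < n)) := by
      rw [← Multiset.coe_eq_coe, hheap, pvBuild_elems]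
      simp [pvElems]
    have hsorted : PySem.List.sorted (pvElems heap) (fun x => x) false
        = PySem.List.sorted (lista.filter (fun num => 0 < num)) (fun x => x) false :=
      PySem.List.sorted_eq_sorted_of_perm _ _ _ (fun a b hab => hab) hperm
    have hc : lista.countP (fun x => 0 < x) ≤ (pvElems heap).length := by
      rw [hperm.length_eq, ← List.countP_eq_length_filter]
    have hA := pvLoopA lista
      (PySem.List.sorted (lista.filter (fun num => 0 < num)) (fun x => x) false) [] 0
      (by rw [PySem.List.length_sorted, ← List.countP_eq_length_filter]; omega)
    simp only [Nat.cast_zero] at hA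
    rw [hA, List.drop_zero, List.nil_append]
    have hB := pvLoopB lista heap []
      (pvBuild_ord lista .leaf trivial) hc
    rw [hB, List.nil_append, hsorted]
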